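-- pv_equiv track=rewrite | github.com/lacunaxu/Python | homework3/lab3.py | is_valid_product_code
-- ===== SOURCE A (Python) =====
-- def is_valid_product_code(code: str) -> bool:
--     """
--     Check if the product code is valid.
--
--     A valid product code must meet the following criteria:
--     1. The code must be exactly 12 characters long.
--     2. It must contain at least two uppercase letters and three digits.
--     3. It must contain exactly one dash ('-'), which cannot be the first or last character.
--     4. All characters must be either alphanumeric or a dash.
--
--     Args:
--         code (str): The product code to validate.
--
--     Returns:
--         bool: True if the product code is valid, False otherwise.
--
--     Raises:
--         Exception: If the input is not a string.
--     """
--     if type(code) is not str: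
--         raise Exception("Invalid input")
--
--     if len(code) != 12:
--         return False
--
--     uppercase = 0
--     digit = 0
--     dash = 0
--
--     if code[0] == '-' or code[-1] == '-':
--         return False
--
--     for i in code:
--         if i == '-':
--             dash += 1
--         elif i.isupper():
--             uppercase += 1
--         elif i.isdigit():
--             digit += 1
--         elif not i.isalnum():
--             return False
--
--     return uppercase >= 2 and digit >= 3 and dash == 1
-- ===== SOURCE B (Python) =====
-- def is_valid_product_code(code: str) -> bool:
--     if type(code) is not str:
--         raise Exception("Invalid input")
--
--     if len(code) != 12:
--         return False
--
--     # Locate the unique dash structurally instead of counting characters.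
--     i = code.find('-')
--     if i < 1 or i > 10 or code.find('-', i + 1) != -1:
--         return False
--
--     body = code[:i] + code[i + 1:]
--     if not body.isalnum():
--         return False
--
--     return sum(map(str.isupper, body)) >= 2 and sum(map(str.isdigit, body)) >= 3
-- ===== Notes on version B (the rewrite author's own statement) =====
-- stated objective: alternative
-- what changed: Replaces A's single stateful counting loop (dash/upper/digit counters with an early-exit bad-character branch) by a locate-the-dash algorithm: find() the unique dash position, reject a second dash via find(start), slice the dash out and validate/count the 11-character alnum body.
import Mathlib
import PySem

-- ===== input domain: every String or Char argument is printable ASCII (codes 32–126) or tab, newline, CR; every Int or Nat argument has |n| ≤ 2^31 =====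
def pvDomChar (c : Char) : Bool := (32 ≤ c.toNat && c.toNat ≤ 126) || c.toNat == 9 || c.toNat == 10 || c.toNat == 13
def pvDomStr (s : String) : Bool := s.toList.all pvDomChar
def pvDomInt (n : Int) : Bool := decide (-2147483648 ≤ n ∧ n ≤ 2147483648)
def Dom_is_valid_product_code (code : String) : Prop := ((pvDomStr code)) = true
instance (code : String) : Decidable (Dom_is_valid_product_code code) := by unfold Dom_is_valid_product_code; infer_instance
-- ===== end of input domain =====

-- B replaces A's counting loop (three counters + early exit) by a locate-the-dash
-- algorithm: find the dash position, reject a second dash with find(start), slice the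
-- dash out and validate/count the remaining body.  Same O(n), different decomposition.
-- (Python A raises only on non-string input, which the type convention excludes; both ports are total.)

-- ===== PORT A =====
-- A's for-loop over the characters: three counters and an early 'return False'
def pvLoopA : List Char → Int → Int → Int → Bool
  | [], uppercase, digit, dash =>
      decide (uppercase ≥ 2) && decide (digit ≥ 3) && (dash == 1)
  | i :: rest, uppercase, digit, dash =>
      if i == '-' then pvLoopA rest uppercase digit (dash + 1)
      else if PySem.Chars.isupper i then pvLoopA rest (uppercase + 1) digit dash
      else if PySem.Chars.isdigit i then pvLoopA rest uppercase (digit + 1) dash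
      else if !(PySem.Chars.isalnum i) then false
      else pvLoopA rest uppercase digit dash

def is_valid_product_code (code : String) : Bool :=
  if code.toList.length ≠ 12 then false
  else if PySem.List.pyGet? code.toList 0 == some '-' || PySem.List.pyGet? code.toList (-1) == some '-' then false
  else pvLoopA code.toList 0 0 0

-- ===== PORT B =====
def is_valid_product_code_alt (code : String) : Bool :=
  if code.toList.length ≠ 12 then false
  else
    -- i = code.find('-')
    let i := PySem.Chars.find code.toList ['-']
    -- if i < 1 or i > 10 or code.find('-', i + 1) != -1: return False
    if i < 1 ∨ 10 < i ∨ PySem.Chars.findFrom code.toList ['-'] (i + 1) ≠ -1 then false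
    else
      -- body = code[:i] + code[i+1:]
      let body := PySem.List.slice code.toList none (some i) ++ PySem.List.slice code.toList (some (i + 1))
      if !(PySem.Chars.strIsalnum body) then false
      else decide (2 ≤ body.countP PySem.Chars.isupper) && decide (3 ≤ body.countP PySem.Chars.isdigit)

-- ===== PRECONDITION & SPEC =====
def Spec_is_valid_product_code (code : String) (out : Bool) : Prop := out = is_valid_product_code_alt code
instance (code : String) (out : Bool) : Decidable (Spec_is_valid_product_code code out) := by unfold Spec_is_valid_product_code; infer_instance

-- ===== CLAIM (what is proved, stated in full; the proofs are below) =====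
def Claim_equal_is_valid_product_code : Prop := ∀ (code : String), Dom_is_valid_product_code code → Spec_is_valid_product_code code (is_valid_product_code code)

-- ===== LEMMAS AND PROOFS =====

lemma upper_not_digit (c : Char) (h : PySem.Chars.isupper c = true) :
    PySem.Chars.isdigit c = false := by
  simp [PySem.Chars.isupper, PySem.Chars.isdigit, Char.le_def, UInt32.le_iff_toNat_le] at *
  omega

lemma upper_alnum (c : Char) (h : PySem.Chars.isupper c = true) :
    PySem.Chars.isalnum c = true := by
  simp [PySem.Chars.isalnum, PySem.Chars.isalpha, h]

lemma digit_alnum (c : Char) (h : PySem.Chars.isdigit c = true) :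
    PySem.Chars.isalnum c = true := by
  simp [PySem.Chars.isalnum, h]

-- A's loop, characterised: an all-characters check plus three independent counts
lemma pvLoopA_eq (cs : List Char) (u d h : Int) :
    pvLoopA cs u d h =
      (cs.all (fun c => PySem.Chars.isalnum c || c == '-')
        && decide (u + (cs.countP PySem.Chars.isupper : Int) ≥ 2)
        && decide (d + (cs.countP PySem.Chars.isdigit : Int) ≥ 3)
        && ((h + (cs.countP (fun c => c == '-') : Int)) == 1)) := by
  induction cs generalizing u d h with
  | nil => simp [pvLoopA]
  | cons c rest ih =>
    by_cases hdash : c = '-'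
    · subst hdash
      simp only [pvLoopA, beq_self_eq_true, if_true, ih, List.all_cons, List.countP_cons,
        (by decide : PySem.Chars.isupper '-' = false),
        (by decide : PySem.Chars.isdigit '-' = false),
        Bool.true_and, Bool.or_true, if_true, if_false, Bool.false_eq_true, add_zero,
        Nat.cast_add, Nat.cast_one]
      have : (h:Int) + 1 + (List.countP (fun c => c == '-') rest : Int)
           = h + ((List.countP (fun c => c == '-') rest : Int) + 1) := by ring
      rw [this]
    · have hne : (c == '-') = false := by simp [hdash]
      by_cases hu : PySem.Chars.isupper c = true
      · simp only [pvLoopA, hne, Bool.false_eq_true, if_false, hu, if_true, ih,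
          List.all_cons, List.countP_cons, upper_not_digit c hu, upper_alnum c hu,
          Bool.true_and, Bool.or_false, add_zero, Nat.cast_add, Nat.cast_one]
        have : (u:Int) + 1 + (List.countP PySem.Chars.isupper rest : Int)
             = u + ((List.countP PySem.Chars.isupper rest : Int) + 1) := by ring
        rw [this]
      · by_cases hd : PySem.Chars.isdigit c = true
        · simp only [pvLoopA, hne, Bool.false_eq_true, if_false, hu, hd, if_true, ih,
            List.all_cons, List.countP_cons, digit_alnum c hd,
            Bool.true_and, Bool.or_false, add_zero, Nat.cast_add, Nat.cast_one]
          have : (d:Int) + 1 + (List.countP PySem.Chars.isdigit rest : Int)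
               = d + ((List.countP PySem.Chars.isdigit rest : Int) + 1) := by ring
          rw [this]
        · by_cases ha : PySem.Chars.isalnum c = true
          · simp [pvLoopA, hne, hu, hd, ha, ih]
          · simp [pvLoopA, hne, hu, hd, ha]

lemma singleton_prefix_iff (a : Char) (t : List Char) :
    [a] <+: t ↔ t.head? = some a := by
  constructor
  · rintro ⟨u, rfl⟩; rfl
  · intro h
    cases t with
    | nil => simp at h
    | cons b u => simp at h; subst h; exact ⟨u, rfl⟩

lemma all_or_dash_eq (t : List Char) (h : '-' ∉ t) :
    t.all (fun c => PySem.Chars.isalnum c || c == '-') = t.all PySem.Chars.isalnum := by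
  induction t with
  | nil => rfl
  | cons c r ih =>
    have hc : (c == '-') = false := by
      simp only [beq_eq_false_iff_ne, ne_eq]
      rintro rfl; exact h (List.mem_cons_self ..)
    simp [List.all_cons, hc, ih (fun hm => h (List.mem_cons_of_mem _ hm))]

-- Core equivalence on the character list, for length-12 inputs
lemma pvMain (l : List Char) (hlen : l.length = 12) :
    (if PySem.List.pyGet? l 0 == some '-' || PySem.List.pyGet? l (-1) == some '-' then false
     else pvLoopA l 0 0 0)
    = (if PySem.Chars.find l ['-'] < 1 ∨ 10 < PySem.Chars.find l ['-']
          ∨ PySem.Chars.findFrom l ['-'] (PySem.Chars.find l ['-'] + 1) ≠ -1 then false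
       else
         if !(PySem.Chars.strIsalnum (PySem.List.slice l none (some (PySem.Chars.find l ['-']))
               ++ PySem.List.slice l (some (PySem.Chars.find l ['-'] + 1)))) then false
         else decide (2 ≤ (PySem.List.slice l none (some (PySem.Chars.find l ['-']))
                 ++ PySem.List.slice l (some (PySem.Chars.find l ['-'] + 1))).countP PySem.Chars.isupper)
           && decide (3 ≤ (PySem.List.slice l none (some (PySem.Chars.find l ['-']))
                 ++ PySem.List.slice l (some (PySem.Chars.find l ['-'] + 1))).countP PySem.Chars.isdigit)) := by
  by_cases hfind : PySem.Chars.find l ['-'] = -1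
  · -- no dash at all: count is 0 on the A side, i < 1 on the B side
    have hmem : '-' ∉ l := by
      have := (PySem.Chars.find_eq_neg_one_iff l ['-']).mp hfind
      rwa [List.singleton_infix_iff] at this
    have hcnt : l.countP (fun c => c == '-') = 0 :=
      List.countP_eq_zero.mpr (fun c hc h => hmem ((beq_iff_eq.mp h) ▸ hc))
    rw [if_pos (Or.inl (by rw [hfind]; norm_num)), pvLoopA_eq]
    simp [hcnt]
  · have hspec := PySem.Chars.findFrom_natCast_spec l ['-'] 0 (Nat.zero_le _)
      (by rw [Nat.cast_zero, PySem.Chars.findFrom_zero]; exact hfind)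
    rw [Nat.cast_zero, PySem.Chars.findFrom_zero] at hspec
    obtain ⟨h0i, hpre, hmin⟩ := hspec
    set n := (PySem.Chars.find l ['-']).toNat with hn
    have hin : PySem.Chars.find l ['-'] = (n : ℤ) := (Int.toNat_of_nonneg h0i).symm
    have hdashn : l[n]? = some '-' := by
      rw [← List.head?_drop]; exact (singleton_prefix_iff _ _).mp hpre
    have hn12 : n < 12 := by
      have := (List.getElem?_eq_some_iff.mp hdashn).1; omega
    have hgetn : ∀ (h : n < l.length), l[n] = '-' := fun h => by
      have := List.getElem?_eq_getElem h; rw [this] at hdashn; exact Option.some.inj hdashn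
    have hbefore : ∀ j < n, l[j]? ≠ some '-' := fun j hj => by
      have h := hmin j (Nat.zero_le _) hj
      rw [singleton_prefix_iff, List.head?_drop] at h; exact h
    have hdecomp : l = l.take n ++ '-' :: l.drop (n + 1) := by
      conv_lhs => rw [← List.take_append_drop n l]
      rw [List.drop_eq_getElem_cons (by omega), hgetn (by omega)]
    by_cases hafter : PySem.Chars.findFrom l ['-'] (PySem.Chars.find l ['-'] + 1) = -1
    · -- exactly one dash
      have hk1 : n + 1 ≤ l.length := by omega
      have hnone : '-' ∉ l.drop (n + 1) := by
        have h := (PySem.Chars.findFrom_natCast_eq_neg_one_iff l ['-'] (n+1) hk1).mp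
          (by rw [Nat.cast_add, Nat.cast_one, ← hin]; exact hafter)
        rwa [List.singleton_infix_iff] at h
      have htake : '-' ∉ l.take n := by
        intro hm
        obtain ⟨j, hjlt, hjeq⟩ := List.getElem_of_mem hm
        have hjn : j < n := by simp at hjlt; omega
        have : l[j] = '-' := by rw [← List.getElem_take]; exact hjeq
        exact hbefore j hjn (by rw [List.getElem?_eq_getElem (by omega)]; simp [this])
      have hcnt1 : l.countP (fun c => c == '-') = 1 := by
        have h1 : (l.take n).countP (fun c => c == '-') = 0 :=
          List.countP_eq_zero.mpr (fun c hc h => htake ((beq_iff_eq.mp h) ▸ hc))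
        have h2 : (l.drop (n + 1)).countP (fun c => c == '-') = 0 :=
          List.countP_eq_zero.mpr (fun c hc h => hnone ((beq_iff_eq.mp h) ▸ hc))
        conv_lhs => rw [hdecomp]
        simp [List.countP_append, h1, h2]
      have hget0 : PySem.List.pyGet? l 0 = l[0]? := by
        simp [PySem.List.pyGet?, PySem.List.pyIdx?, hlen]
      have hget11 : PySem.List.pyGet? l (-1) = l[11]? := by
        simp [PySem.List.pyGet?, PySem.List.pyIdx?, hlen]
      by_cases hn0 : n = 0
      · -- dash is the first character: both guards fire
        have h0 : l[0]? = some '-' := hn0 ▸ hdashn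
        have hAg : (PySem.List.pyGet? l 0 == some '-' || PySem.List.pyGet? l (-1) == some '-') = true := by
          rw [hget0, h0]; simp
        have hBg : PySem.Chars.find l ['-'] < 1 ∨ 10 < PySem.Chars.find l ['-']
            ∨ PySem.Chars.findFrom l ['-'] (PySem.Chars.find l ['-'] + 1) ≠ -1 :=
          Or.inl (by rw [hin, hn0]; norm_num)
        rw [if_pos hAg, if_pos hBg]
      · by_cases hn11 : n = 11
        · -- dash is the last character: both guards fire
          have h11 : l[11]? = some '-' := hn11 ▸ hdashn
          have hAg : (PySem.List.pyGet? l 0 == some '-' || PySem.List.pyGet? l (-1) == some '-') = true := by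
            rw [hget11, h11]; simp
          have hBg : PySem.Chars.find l ['-'] < 1 ∨ 10 < PySem.Chars.find l ['-']
              ∨ PySem.Chars.findFrom l ['-'] (PySem.Chars.find l ['-'] + 1) ≠ -1 :=
            Or.inr (Or.inl (by rw [hin, hn11]; norm_num))
          rw [if_pos hAg, if_pos hBg]
        · -- dash strictly inside: neither guard fires; compare the two bodies
          have hge1 : 1 ≤ n := Nat.one_le_iff_ne_zero.mpr hn0
          have hle10 : n ≤ 10 := by omega
          have hA0 : l[0]? ≠ some '-' := hbefore 0 (by omega)
          have hA11 : l[11]? ≠ some '-' := by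
            intro h
            apply hnone
            have h' : (l.drop (n + 1))[11 - (n + 1)]? = some '-' := by
              rw [List.getElem?_drop]
              rw [(by omega : n + 1 + (11 - (n + 1)) = 11)]; exact h
            exact List.mem_of_getElem? h'
          rw [if_neg (by rw [hget0, hget11]; simp [hA0, hA11])]
          rw [if_neg (by
            rw [hin]
            rintro (h | h | h)
            · omega
            · omega
            · exact h (by rw [← hin]; exact hafter))]
          have hsl1 : PySem.List.slice l none (some (PySem.Chars.find l ['-'])) = l.take n := by
            rw [hin, PySem.List.slice_to l (b := (n : Int)) (by exact_mod_cast Nat.zero_le n)]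
            simp
          have hsl2 : PySem.List.slice l (some (PySem.Chars.find l ['-'] + 1)) = l.drop (n + 1) := by
            rw [hin, PySem.List.slice_from l (a := (n : Int) + 1) (by omega)]
            rw [(by omega : ((n : Int) + 1).toNat = n + 1)]
          have hu : l.countP PySem.Chars.isupper
              = (l.take n).countP PySem.Chars.isupper + (l.drop (n + 1)).countP PySem.Chars.isupper := by
            conv_lhs => rw [hdecomp]
            simp [List.countP_append,
              show PySem.Chars.isupper '-' = false from by decide]
          have hd : l.countP PySem.Chars.isdigit
              = (l.take n).countP PySem.Chars.isdigit + (l.drop (n + 1)).countP PySem.Chars.isdigit := by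
            conv_lhs => rw [hdecomp]
            simp [List.countP_append,
              show PySem.Chars.isdigit '-' = false from by decide]
          have hall : l.all (fun c => PySem.Chars.isalnum c || c == '-')
              = (l.take n ++ l.drop (n + 1)).all PySem.Chars.isalnum := by
            conv_lhs => rw [hdecomp]
            simp only [List.all_append, List.all_cons,
              (by decide : (PySem.Chars.isalnum '-' || '-' == '-') = true),
              Bool.true_and]
            rw [all_or_dash_eq _ htake, all_or_dash_eq _ hnone]
          have hne : ¬(l.take n ++ l.drop (n + 1)).isEmpty = true := by
            intro h
            rw [List.isEmpty_iff_length_eq_zero, List.length_append, List.length_take,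
              List.length_drop, hlen] at h
            omega
          rw [pvLoopA_eq, hsl1, hsl2, hcnt1, hu, hd, hall]
          have e1 : decide ((2:Int) ≤ (List.countP PySem.Chars.isupper (List.take n l) : Int)
                  + (List.countP PySem.Chars.isupper (List.drop (n+1) l) : Int))
              = decide (2 ≤ List.countP PySem.Chars.isupper (List.take n l)
                  + List.countP PySem.Chars.isupper (List.drop (n+1) l)) := by
            rw [decide_eq_decide]; omega
          have e2 : decide ((3:Int) ≤ (List.countP PySem.Chars.isdigit (List.take n l) : Int)
                  + (List.countP PySem.Chars.isdigit (List.drop (n+1) l) : Int))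
              = decide (3 ≤ List.countP PySem.Chars.isdigit (List.take n l)
                  + List.countP PySem.Chars.isdigit (List.drop (n+1) l)) := by
            rw [decide_eq_decide]; omega
          simp only [PySem.Chars.strIsalnum, hne, Bool.not_false, Bool.true_and,
            List.countP_append, Nat.cast_add, Nat.cast_one]
          cases (List.take n l ++ List.drop (n + 1) l).all PySem.Chars.isalnum
          · simp
          · simp
            rw [e1, e2]
    · -- a second dash exists: both sides are false
      have hk1 : n + 1 ≤ l.length := by omega
      have hmem2 : '-' ∈ l.drop (n + 1) := by
        have h := (PySem.Chars.findFrom_natCast_eq_neg_one_iff l ['-'] (n+1) hk1)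
        rw [Nat.cast_add, Nat.cast_one, ← hin] at h
        have := mt h.mpr (by simpa using hafter)
        rw [not_not, List.singleton_infix_iff] at this; exact this
      have hcnt2 : 2 ≤ l.countP (fun c => c == '-') := by
        have h2 : 0 < (l.drop (n + 1)).countP (fun c => c == '-') :=
          List.countP_pos_iff.mpr ⟨'-', hmem2, by simp⟩
        conv_rhs => rw [hdecomp]
        simp only [List.countP_append, List.countP_cons, beq_self_eq_true, if_true]
        omega
      rw [if_pos (Or.inr (Or.inr hafter)), pvLoopA_eq]
      have : ((0 : Int) + (l.countP (fun c => c == '-') : Int) == 1) = false := by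
        simp; omega
      simp only [this, Bool.and_false]
      split <;> rfl

-- ===== VERDICT (by name: the statement is the Claim_ definition above) =====
theorem is_valid_product_code_spec : Claim_equal_is_valid_product_code := by
  intro code _
  unfold Spec_is_valid_product_code is_valid_product_code is_valid_product_code_alt
  by_cases hlen : code.toList.length = 12
  · have h1 : ¬(code.toList.length ≠ 12) := fun h => h hlen
    rw [if_neg h1, if_neg h1]
    exact pvMain code.toList hlen
  · rw [if_pos hlen, if_pos hlen]
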